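-- pv_equiv track=rewrite | github.com/heng840/DKN | plot_degeneracy.py | aggregate_data_by_size
-- ===== SOURCE A (Python) =====
-- def aggregate_data_by_size(data):
--     size_based_aggregation = {}
--     for uuid, results in data.items():
--         if len(results['dkn_cluster_2']) > 1:
--             size = str(len(results['dkn_cluster_2']))
--             if size not in size_based_aggregation:
--                 size_based_aggregation[size] = []
--             size_based_aggregation[size].append(results)
--
--     return size_based_aggregation
-- ===== SOURCE B (Python) =====
-- def aggregate_data_by_size(data):
--     # Two-pass alternative: collect the distinct bucket keys in first-occurrence
--     # order, then build each bucket by one rescan of the values.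
--     sizes = []
--     for results in data.values():
--         n = len(results['dkn_cluster_2'])
--         if n > 1 and str(n) not in sizes:
--             sizes.append(str(n))
--     return {s: [r for r in data.values()
--                 if len(r['dkn_cluster_2']) > 1 and str(len(r['dkn_cluster_2'])) == s]
--             for s in sizes}
-- ===== Notes on version B (the rewrite author's own statement) =====
-- stated objective: alternative
-- what changed: A builds the buckets in one pass by incrementally updating a dict; B first collects the distinct size keys in first-occurrence order and then builds each bucket by filtering the values again (collect-keys-then-rescan).
import Mathlib
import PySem

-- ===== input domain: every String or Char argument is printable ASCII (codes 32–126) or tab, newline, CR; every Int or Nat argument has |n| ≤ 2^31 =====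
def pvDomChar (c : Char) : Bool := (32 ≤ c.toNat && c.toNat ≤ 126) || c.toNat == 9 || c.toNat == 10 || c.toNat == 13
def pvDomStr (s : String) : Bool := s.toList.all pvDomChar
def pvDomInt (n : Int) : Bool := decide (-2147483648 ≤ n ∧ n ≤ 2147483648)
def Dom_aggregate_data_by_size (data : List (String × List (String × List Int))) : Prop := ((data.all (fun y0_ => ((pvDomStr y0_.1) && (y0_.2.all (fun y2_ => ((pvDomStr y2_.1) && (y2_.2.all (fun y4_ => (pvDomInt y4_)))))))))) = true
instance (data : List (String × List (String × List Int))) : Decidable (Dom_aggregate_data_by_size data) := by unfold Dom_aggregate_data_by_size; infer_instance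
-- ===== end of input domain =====

-- B replaces A's one-pass incremental dict update by a two-pass collect-keys-then-rescan
-- construction (objective: alternative); return values proved equal, no speed claim.

-- ===== PORT A =====
-- results['dkn_cluster_2'] : Python raises KeyError when the key is absent (get? = none);
-- those inputs are excluded by Pre_ below, so the `.getD … []` default is never taken there.
def aggregate_data_by_size (data : List (String × List (String × List Int))) : List (String × List (List (String × List Int))) :=
  (data.foldl (fun d p =>
      let c := (PySem.Dict.mk p.2).getD "dkn_cluster_2" []
      if 1 < c.length then
        let size := PySem.Int.toStr (c.length : Int)
        let d := if !(d.contains size) then d.insert size ([] : List (List (String × List Int))) else d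
        d.modify size [] (fun l => l ++ [p.2])
      else d)
    PySem.Dict.empty).items

-- ===== PORT B =====
def aggregate_data_by_size_alt (data : List (String × List (String × List Int))) : List (String × List (List (String × List Int))) :=
  let sizes := data.foldl (fun sizes p =>
      let c := (PySem.Dict.mk p.2).getD "dkn_cluster_2" []
      if 1 < c.length ∧ PySem.Int.toStr (c.length : Int) ∉ sizes
      then sizes ++ [PySem.Int.toStr (c.length : Int)] else sizes) ([] : List String)
  sizes.map (fun s => (s,
    (data.filter (fun p =>
        let c := (PySem.Dict.mk p.2).getD "dkn_cluster_2" []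
        decide (1 < c.length) && (PySem.Int.toStr (c.length : Int) == s))).map (·.2)))

-- ===== PRECONDITION & SPEC =====
-- Pre_ excludes exactly the inputs on which the Python A raises KeyError: some inner dict
-- lacks the key "dkn_cluster_2".
def Pre_aggregate_data_by_size (data : List (String × List (String × List Int))) : Prop :=
  ∀ p ∈ data, (PySem.Dict.mk p.2).contains "dkn_cluster_2" = true
instance (data : List (String × List (String × List Int))) : Decidable (Pre_aggregate_data_by_size data) := by unfold Pre_aggregate_data_by_size; infer_instance

def pvWitness_aggregate_data_by_size : (List (String × List (String × List Int))) :=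
  [("u1", [("dkn_cluster_2", [1, 2])]), ("u2", [("dkn_cluster_2", [7])])]

def Spec_aggregate_data_by_size (data : List (String × List (String × List Int))) (out : List (String × List (List (String × List Int)))) : Prop := out = aggregate_data_by_size_alt data
instance (data : List (String × List (String × List Int))) (out : List (String × List (List (String × List Int)))) : Decidable (Spec_aggregate_data_by_size data out) := by unfold Spec_aggregate_data_by_size; infer_instance

-- ===== CLAIM (what is proved, stated in full; the proofs are below) =====
def Claim_equal_aggregate_data_by_size : Prop := ∀ (data : List (String × List (String × List Int))), Dom_aggregate_data_by_size data → Pre_aggregate_data_by_size data → Spec_aggregate_data_by_size data (aggregate_data_by_size data)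

-- ===== LEMMAS AND PROOFS =====

-- the cluster-2 list, its "big" test and its bucket key, shared shorthands for the proofs
def pvBig (p : String × List (String × List Int)) : Bool :=
  decide (1 < ((PySem.Dict.mk p.2).getD "dkn_cluster_2" []).length)
def pvKey (p : String × List (String × List Int)) : String :=
  PySem.Int.toStr ((((PySem.Dict.mk p.2).getD "dkn_cluster_2" []).length : Int))

lemma pv_foldl_if_filter {α β : Type} (c : α → Bool) (g : β → α → β) :
    ∀ (l : List α) (d : β),
      l.foldl (fun d p => if c p then g d p else d) d = (l.filter c).foldl g d := by
  intro l
  induction l with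
  | nil => intro d; rfl
  | cons x xs ih =>
      intro d
      by_cases h : c x = true <;> simp [List.foldl_cons, h, ih]

-- A's "if absent insert []; then append" equals a single modify
lemma pv_stepA_eq (d : PySem.Dict String (List (List (String × List Int))))
    (p : String × List (String × List Int)) :
    (let c := (PySem.Dict.mk p.2).getD "dkn_cluster_2" []
     if 1 < c.length then
       let size := PySem.Int.toStr (c.length : Int)
       let d := if !(d.contains size) then d.insert size ([] : List (List (String × List Int))) else d
       d.modify size [] (fun l => l ++ [p.2])
     else d)
    = if pvBig p then d.modify (pvKey p) [] (fun l => l ++ [p.2]) else d := by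
  simp only [pvBig, pvKey]
  by_cases h : 1 < ((PySem.Dict.mk p.2).getD "dkn_cluster_2" []).length
  · simp only [h, if_pos, decide_eq_true_eq]
    by_cases hc : (d.contains (PySem.Int.toStr ((((PySem.Dict.mk p.2).getD "dkn_cluster_2" []).length : Int)))) = true
    · simp [hc]
    · simp only [Bool.not_eq_true] at hc
      simp [hc, PySem.Dict.modify, PySem.Dict.insert_insert_self,
        PySem.Dict.getD_insert_self, PySem.Dict.getD_of_not_contains d _ hc]
  · simp [h]

lemma pv_stepB_eq (s : List String) (p : String × List (String × List Int)) :
    (let c := (PySem.Dict.mk p.2).getD "dkn_cluster_2" []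
     if 1 < c.length ∧ PySem.Int.toStr (c.length : Int) ∉ s
     then s ++ [PySem.Int.toStr (c.length : Int)] else s)
    = if pvBig p then PySem.Set.add s (pvKey p) else s := by
  simp only [pvBig, pvKey, PySem.Set.add]
  by_cases h : 1 < ((PySem.Dict.mk p.2).getD "dkn_cluster_2" []).length
  · by_cases hm : PySem.Int.toStr ((((PySem.Dict.mk p.2).getD "dkn_cluster_2" []).length : Int)) ∈ s
    · simp [h, hm]
    · simp [h, hm]
  · simp [h]

lemma pv_A_eq (data : List (String × List (String × List Int))) :
    aggregate_data_by_size data =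
      (((data.filter pvBig).map (fun p => (pvKey p, p.2))).foldl
        (fun (d : PySem.Dict String (List (List (String × List Int)))) q =>
          d.modify q.1 [] (fun l => l ++ [q.2])) PySem.Dict.empty).items := by
  unfold aggregate_data_by_size
  rw [List.foldl_map]
  congr 1
  have : (fun (d : PySem.Dict String (List (List (String × List Int)))) (p : String × List (String × List Int)) =>
      let c := (PySem.Dict.mk p.2).getD "dkn_cluster_2" []
      if 1 < c.length then
        let size := PySem.Int.toStr (c.length : Int)
        let d := if !(d.contains size) then d.insert size ([] : List (List (String × List Int))) else d
        d.modify size [] (fun l => l ++ [p.2])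
      else d)
      = fun d p => if pvBig p then d.modify (pvKey p) [] (fun l => l ++ [p.2]) else d := by
    funext d p; exact pv_stepA_eq d p
  rw [this, pv_foldl_if_filter]

lemma pv_sizes_eq (data : List (String × List (String × List Int))) :
    data.foldl (fun sizes p =>
        let c := (PySem.Dict.mk p.2).getD "dkn_cluster_2" []
        if 1 < c.length ∧ PySem.Int.toStr (c.length : Int) ∉ sizes
        then sizes ++ [PySem.Int.toStr (c.length : Int)] else sizes) ([] : List String)
      = PySem.Set.ofList ((data.filter pvBig).map pvKey) := by
  have : (fun (sizes : List String) p =>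
      let c := (PySem.Dict.mk p.2).getD "dkn_cluster_2" []
      if 1 < c.length ∧ PySem.Int.toStr (c.length : Int) ∉ sizes
      then sizes ++ [PySem.Int.toStr (c.length : Int)] else sizes)
      = fun sizes p => if pvBig p then PySem.Set.add sizes (pvKey p) else sizes := by
    funext s p; exact pv_stepB_eq s p
  rw [this, pv_foldl_if_filter, ← PySem.Set.update_map_eq_foldl_add,
    ← PySem.Set.update_empty ((data.filter pvBig).map pvKey)]
  rfl

-- ===== VERDICT (by name: the statement is the Claim_ definition above) =====
theorem aggregate_data_by_size_spec : Claim_equal_aggregate_data_by_size := by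
  intro data _hDom _hPre
  unfold Spec_aggregate_data_by_size
  rw [pv_A_eq]
  unfold aggregate_data_by_size_alt
  rw [pv_sizes_eq]
  set F := data.filter pvBig with hF
  set L := F.map (fun p => (pvKey p, p.2)) with hL
  have hkeys : (L.foldl (fun (d : PySem.Dict String (List (List (String × List Int)))) q => d.modify q.1 [] (fun l => l ++ [q.2]))
      PySem.Dict.empty).keys
      = PySem.Set.ofList (F.map pvKey) := by
    have := PySem.Dict.keys_foldl_modify_key L (fun q => q.1) []
      (fun _ q l => l ++ [q.2]) (PySem.Dict.empty)
    rw [this]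
    have : L.map (fun q => q.1) = F.map pvKey := by
      simp [hL, List.map_map, Function.comp]
    rw [this]
    simpa using PySem.Set.update_empty (F.map pvKey)
  have hnodup : (L.foldl (fun (d : PySem.Dict String (List (List (String × List Int)))) q => d.modify q.1 [] (fun l => l ++ [q.2]))
      PySem.Dict.empty).keys.Nodup := by
    apply PySem.Dict.nodup_keys_foldl_modify_key
    simp
  rw [PySem.Dict.items_eq_map_keys _ hnodup [], hkeys]
  apply List.map_congr_left
  intro s _hs
  rw [PySem.Dict.getD_foldl_modify_append]
  simp only [PySem.Dict.getD_empty, List.nil_append]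
  have hfil : L.filter (fun q => q.1 == s) = (F.filter (fun p => pvKey p == s)).map (fun p => (pvKey p, p.2)) := by
    rw [hL, List.filter_map]; rfl
  rw [hfil, List.map_map]
  have : data.filter (fun p =>
      let c := (PySem.Dict.mk p.2).getD "dkn_cluster_2" []
      decide (1 < c.length) && (PySem.Int.toStr (c.length : Int) == s))
      = F.filter (fun p => pvKey p == s) := by
    rw [hF, List.filter_filter]
    apply List.filter_congr
    intro p _
    simp [pvBig, pvKey, Bool.and_comm]
  rw [this]
  rfl
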